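-- pv_equiv track=rewrite | github.com/divyeshpaladugu/Data-Structures-and-Object-Oriented-Design | contains_permutation.py | contains_permutation
-- ===== SOURCE A (Python) =====
-- def contains_permutation(input_string, pattern):
--     """Determins if string input contains permutation(pattern)"""
--     if len(input_string) < len(pattern):
--         return False
--
--     my_dict = {}
--     new_dict = {}
--
--     for char in pattern:
--         my_dict[char] = my_dict.get(char, 0) + 1
--     for char in input_string[:len(pattern)]:
--         new_dict[char] = new_dict.get(char, 0) + 1
--
--     if new_dict == my_dict:
--         return True
--
--     for i in range(len(pattern), len(input_string)):
--         new_dict[input_string[i - len(pattern)]] -= 1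
--         if new_dict[input_string[i - len(pattern)]] == 0:
--             del new_dict[input_string[i - len(pattern)]]
--         new_dict[input_string[i]] = new_dict.get(input_string[i], 0) + 1
--
--         if new_dict == my_dict:
--             return True
--
--     return False
-- ===== SOURCE B (Python) =====
-- def contains_permutation(input_string, pattern):
--     """Determins if string input contains permutation(pattern)"""
--     k = len(pattern)
--     if len(input_string) < k:
--         return False
--     target = sorted(pattern)
--     return any(sorted(input_string[i:i + k]) == target
--                for i in range(len(input_string) - k + 1))
-- ===== Notes on version B (the rewrite author's own statement) =====
-- stated objective: simpler
-- what changed: Replaces the sliding hash-counter with decrement/delete-key bookkeeping and a full dict comparison per step by a direct scan that compares each window's sorted characters against the sorted pattern.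
import Mathlib
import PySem

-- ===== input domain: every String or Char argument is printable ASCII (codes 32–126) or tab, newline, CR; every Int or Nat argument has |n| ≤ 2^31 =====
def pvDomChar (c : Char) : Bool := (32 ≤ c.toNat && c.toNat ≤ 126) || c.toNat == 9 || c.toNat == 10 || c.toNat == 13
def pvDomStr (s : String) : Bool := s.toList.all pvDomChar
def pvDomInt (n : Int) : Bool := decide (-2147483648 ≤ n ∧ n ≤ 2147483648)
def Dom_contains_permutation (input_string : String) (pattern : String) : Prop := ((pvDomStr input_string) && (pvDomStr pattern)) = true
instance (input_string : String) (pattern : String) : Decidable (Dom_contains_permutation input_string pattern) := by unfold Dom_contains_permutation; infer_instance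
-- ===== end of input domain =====

-- B replaces A's sliding hash-counter (decrement/delete-key bookkeeping + full dict comparison per
-- step) by a direct scan comparing each window's sorted characters to the sorted pattern (simpler).

-- ===== PORT A =====
-- Python's `d1 == d2` on dicts: order-insensitive map equality.
def pyDictEq (d1 d2 : PySem.Dict Char Int) : Bool :=
  (d1.keys.all fun c => d2.get? c == d1.get? c) && (d2.keys.all fun c => d1.get? c == d2.get? c)

-- A's loop body. `new_dict[s[i-k]] -= 1` is Dict.modify with default 0: exact here, because the
-- key s[i-k] belongs to the current window so it is always present when this line runs in Python.
-- String indexing s[i-k], s[i] is via pyGetD with a dummy default: both indices are always in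
-- range (k ≤ i < len(s)), so this is exact too.
def cpStep (sl : List Char) (k : Int) (my : PySem.Dict Char Int)
    (st : PySem.Dict Char Int × Bool) (i : Int) : PySem.Dict Char Int × Bool :=
  if st.2 then st     -- already returned True
  else
    let cOld := PySem.List.pyGetD sl (i - k) ' '
    let d1 := st.1.modify cOld 0 (· - 1)
    let d2 := if d1.getD cOld 0 == 0 then d1.erase cOld else d1
    let cNew := PySem.List.pyGetD sl i ' '
    let d3 := d2.insert cNew (d2.getD cNew 0 + 1)
    (d3, pyDictEq d3 my)

def contains_permutation (input_string : String) (pattern : String) : Bool :=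
  let sl := input_string.toList
  let pl := pattern.toList
  if sl.length < pl.length then false
  else
    let my_dict := pl.foldl (fun d c => d.insert c (d.getD c 0 + 1)) PySem.Dict.empty
    let new_dict := (PySem.List.slice sl none (some (pl.length : Int))).foldl
        (fun d c => d.insert c (d.getD c 0 + 1)) PySem.Dict.empty
    if pyDictEq new_dict my_dict then true
    else
      ((PySem.List.pyRange (pl.length : Int) (sl.length : Int)).foldl
        (cpStep sl (pl.length : Int) my_dict) (new_dict, false)).2

-- ===== PORT B =====
def contains_permutation_alt (input_string : String) (pattern : String) : Bool :=
  let sl := input_string.toList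
  let pl := pattern.toList
  if sl.length < pl.length then false
  else
    let target := PySem.List.sorted pl (fun c => c) false
    (PySem.List.pyRange 0 ((sl.length - pl.length + 1 : Nat) : Int)).any fun i =>
      PySem.List.sorted (PySem.List.slice sl (some i) (some (i + (pl.length : Int))))
        (fun c => c) false == target

-- ===== PRECONDITION & SPEC =====
def Spec_contains_permutation (input_string : String) (pattern : String) (out : Bool) : Prop := out = contains_permutation_alt input_string pattern
instance (input_string : String) (pattern : String) (out : Bool) : Decidable (Spec_contains_permutation input_string pattern out) := by unfold Spec_contains_permutation; infer_instance

-- ===== CLAIM (what is proved, stated in full; the proofs are below) =====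
def Claim_equal_contains_permutation : Prop := ∀ (input_string : String) (pattern : String), Dom_contains_permutation input_string pattern → Spec_contains_permutation input_string pattern (contains_permutation input_string pattern)

-- ===== LEMMAS AND PROOFS =====

-- `d` represents exactly the positive character counts of `w` (what A's new_dict maintains).
def IsCnt (d : PySem.Dict Char Int) (w : List Char) : Prop :=
  ∀ c, d.get? c = if 0 < w.count c then some (w.count c : Int) else none

theorem get?_erase {κ ν : Type} [BEq κ] [LawfulBEq κ] [DecidableEq κ] (d : PySem.Dict κ ν) (k k' : κ) :
    (d.erase k).get? k' = if k' = k then none else d.get? k' := by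
  obtain ⟨items⟩ := d
  simp only [PySem.Dict.erase, PySem.Dict.get?, List.find?_filter]
  by_cases hk : k' = k
  · subst hk
    rw [List.find?_eq_none.mpr (by intro x hx; simp)]
    simp
  · rw [if_neg hk]
    have he : (fun a : κ × ν => decide ((!a.1 == k) = true ∧ (a.1 == k') = true))
        = (fun p : κ × ν => p.1 == k') := by
      funext a
      by_cases ha : a.1 = k' <;> simp [ha]
      exact hk
    rw [he]


theorem pyDictEq_iff (d1 d2 : PySem.Dict Char Int) :
    pyDictEq d1 d2 = true ↔ ∀ c, d1.get? c = d2.get? c := by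
  unfold pyDictEq
  simp only [Bool.and_eq_true, List.all_eq_true, beq_iff_eq]
  constructor
  · rintro ⟨h1, h2⟩ c
    by_cases hc1 : c ∈ d1.keys
    · exact (h1 c hc1).symm
    · by_cases hc2 : c ∈ d2.keys
      · exact h2 c hc2
      · rw [(PySem.Dict.get?_eq_none_iff_not_mem_keys d1 c).mpr hc1,
            (PySem.Dict.get?_eq_none_iff_not_mem_keys d2 c).mpr hc2]
  · intro h
    exact ⟨fun c _ => (h c).symm, fun c _ => h c⟩


theorem isCnt_counter (w : List Char) : IsCnt (PySem.Dict.counter w) w := by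
  intro c
  by_cases hc : 0 < w.count c
  · rw [if_pos hc]
    have hcon : (PySem.Dict.counter w).contains c = true := by
      rw [PySem.Dict.contains_counter]
      rw [List.contains_iff_mem]
      exact List.count_pos_iff.mp hc
    have : ((PySem.Dict.counter w).get? c).isSome := by
      rw [← PySem.Dict.contains_eq_isSome_get?]; exact hcon
    obtain ⟨v, hv⟩ := Option.isSome_iff_exists.mp this
    rw [hv]
    have := PySem.Dict.getD_of_get?_eq_some (d := PySem.Dict.counter w) 0 hv
    rw [PySem.Dict.getD_counter] at this
    rw [this]
  · rw [if_neg hc]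
    rw [PySem.Dict.get?_eq_none_iff_contains, PySem.Dict.contains_counter]
    rw [Bool.eq_false_iff]
    intro hmem
    rw [List.contains_iff_mem] at hmem
    exact hc (List.count_pos_iff.mpr hmem)


theorem isCnt_getD (d : PySem.Dict Char Int) (w : List Char) (h : IsCnt d w) (c : Char) :
    d.getD c 0 = (w.count c : Int) := by
  rw [PySem.Dict.getD_eq_get?_getD, h c]
  by_cases hc : 0 < w.count c
  · simp [hc]
  · simp only [if_neg hc, Option.getD_none]
    omega


theorem pyDictEq_isCnt_iff (d1 d2 : PySem.Dict Char Int) (w p : List Char)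
    (h1 : IsCnt d1 w) (h2 : IsCnt d2 p) : pyDictEq d1 d2 = true ↔ w.Perm p := by
  rw [pyDictEq_iff, List.perm_iff_count]
  constructor
  · intro h c
    have := h c
    rw [h1 c, h2 c] at this
    by_cases hw : 0 < w.count c <;> by_cases hp : 0 < p.count c <;>
      simp [hw, hp] at this ⊢ <;> omega
  · intro h c
    rw [h1 c, h2 c, h c]


-- the three dict updates of A's loop body take a counter of (x :: T) to a counter of (T ++ [y])
theorem isCnt_step (d : PySem.Dict Char Int) (x y : Char) (T : List Char)
    (h : IsCnt d (x :: T)) :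
    IsCnt ((if (d.modify x 0 (· - 1)).getD x 0 == 0
              then (d.modify x 0 (· - 1)).erase x
              else d.modify x 0 (· - 1)).insert y
            ((if (d.modify x 0 (· - 1)).getD x 0 == 0
              then (d.modify x 0 (· - 1)).erase x
              else d.modify x 0 (· - 1)).getD y 0 + 1)) (T ++ [y]) := by
  have hgd : ∀ c, d.getD c 0 = ((x :: T).count c : Int) := isCnt_getD d _ h
  -- new_dict after the decrement
  have hd1 : ∀ c, (d.modify x 0 (· - 1)).get? c
      = if c = x then some (T.count x : Int) else d.get? c := by
    intro c
    simp only [PySem.Dict.modify, PySem.Dict.get?_insert, hgd x]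
    rw [List.count_cons_self]
    split
    · push_cast; ring_nf
    · rfl
  have hgd1 : (d.modify x 0 (· - 1)).getD x 0 = (T.count x : Int) := by
    rw [PySem.Dict.getD_eq_get?_getD, hd1 x, if_pos rfl]; rfl
  -- new_dict after the delete-if-zero: a counter of T
  have hd2 : IsCnt (if (d.modify x 0 (· - 1)).getD x 0 == 0
              then (d.modify x 0 (· - 1)).erase x
              else d.modify x 0 (· - 1)) T := by
    intro c
    rw [hgd1]
    by_cases hz : T.count x = 0
    · rw [if_pos (by simp [hz]), get?_erase, hd1 c]
      by_cases hc : c = x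
      · simp [hc, hz]
      · rw [if_neg hc, if_neg hc, h c, List.count_cons_of_ne (Ne.symm hc)]
    · rw [if_neg (by simpa using hz), hd1 c]
      by_cases hc : c = x
      · subst hc; rw [if_pos rfl, if_pos (by omega)]
      · rw [if_neg hc, h c, List.count_cons_of_ne (Ne.symm hc)]
  -- and after the append
  intro c
  rw [PySem.Dict.get?_insert]
  have hgd2 := isCnt_getD _ _ hd2
  by_cases hc : c = y
  · subst hc
    rw [if_pos rfl, hgd2 c, List.count_append, List.count_singleton]
    simp only [beq_self_eq_true, if_pos]
    rw [if_pos (by omega)]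
    push_cast; ring_nf
  · rw [if_neg hc, hd2 c, List.count_append, List.count_singleton]
    have : (y == c) = false := by simp [Ne.symm hc]
    rw [this]
    simp


theorem foldl_frozen (sl : List Char) (k : Int) (my : PySem.Dict Char Int)
    (l : List Int) (d : PySem.Dict Char Int) :
    l.foldl (cpStep sl k my) (d, true) = (d, true) := by
  induction l with
  | nil => rfl
  | cons a t ih => simpa [List.foldl_cons, cpStep] using ih


theorem take_cons_getD {α : Type} (l : List α) (j k : Nat) (dflt : α)
    (hj : j < l.length) (hk : 0 < k) :
    (l.drop j).take k = l.getD j dflt :: (l.drop (j + 1)).take (k - 1) := by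
  obtain ⟨k', rfl⟩ : ∃ k', k = k' + 1 := ⟨k - 1, by omega⟩
  rw [List.drop_eq_getElem_cons hj, List.take_succ_cons, List.getD_eq_getElem l dflt hj]
  norm_num


theorem take_snoc_getD {α : Type} (l : List α) (k : Nat) (dflt : α) (hk : k < l.length) :
    l.take (k + 1) = l.take k ++ [l.getD k dflt] := by
  rw [List.take_add_one, List.getElem?_eq_getElem hk, List.getD_eq_getElem l dflt hk]
  rfl


theorem pyRange_nil (a b : Int) (h : b ≤ a) : PySem.List.pyRange a b = [] := by
  rw [List.eq_nil_iff_forall_not_mem]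
  intro x hx
  have := PySem.List.mem_pyRange_one.mp hx
  omega


theorem loop_lemma (sl pl : List Char) (hkn : pl.length ≤ sl.length) (hk : 0 < pl.length)
    (m : Nat) :
    ∀ (i : Nat), sl.length - i ≤ m → pl.length ≤ i → i ≤ sl.length →
    ∀ d, IsCnt d ((sl.drop (i - pl.length)).take pl.length) →
    (((PySem.List.pyRange (i : Int) (sl.length : Int)).foldl
        (cpStep sl (pl.length : Int) (PySem.Dict.counter pl))
        (d, false)).2 = true ↔
      ∃ j, i - pl.length < j ∧ j ≤ sl.length - pl.length ∧
        ((sl.drop j).take pl.length).Perm pl) := by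
  induction m with
  | zero =>
    intro i him hki hin d _
    have hi : i = sl.length := by omega
    subst hi
    rw [pyRange_nil _ _ (le_refl _)]
    simp only [List.foldl_nil]
    constructor
    · intro h; simp at h
    · rintro ⟨j, hj1, hj2, _⟩; omega
  | succ m ih =>
    intro i him hki hin d hd
    by_cases hlt : i < sl.length
    case neg =>
      have hi : i = sl.length := by omega
      subst hi
      rw [pyRange_nil _ _ (le_refl _)]
      simp only [List.foldl_nil]
      constructor
      · intro h; simp at h
      · rintro ⟨j, hj1, hj2, _⟩; omega
    case pos =>
      have hcons : PySem.List.pyRange (i : Int) (sl.length : Int)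
          = (i : Int) :: PySem.List.pyRange ((i : Int) + 1) (sl.length : Int) :=
        PySem.List.pyRange_one_cons (by exact_mod_cast hlt)
      rw [hcons, List.foldl_cons]
      have hx : PySem.List.pyGetD sl ((i : Int) - (pl.length : Int)) ' '
          = sl.getD (i - pl.length) ' ' := by
        rw [show (i : Int) - (pl.length : Int) = ((i - pl.length : Nat) : Int) by omega,
          PySem.List.pyGetD_natCast]
      have hy : PySem.List.pyGetD sl (i : Int) ' ' = sl.getD i ' ' :=
        PySem.List.pyGetD_natCast sl i ' '
      have hw1 : (sl.drop (i - pl.length)).take pl.length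
          = sl.getD (i - pl.length) ' ' :: (sl.drop (i - pl.length + 1)).take (pl.length - 1) :=
        take_cons_getD sl _ _ ' ' (by omega) hk
      have hlen : pl.length - 1 < (sl.drop (i - pl.length + 1)).length := by
        rw [List.length_drop]; omega
      have hw2 : (sl.drop (i - pl.length + 1)).take pl.length
          = (sl.drop (i - pl.length + 1)).take (pl.length - 1) ++ [sl.getD i ' '] := by
        have h2 := take_snoc_getD (sl.drop (i - pl.length + 1)) (pl.length - 1) ' ' hlen
        rw [show pl.length - 1 + 1 = pl.length by omega] at h2
        rw [h2]
        congr 2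
        rw [List.getD_eq_getElem _ _ hlen, List.getElem_drop, List.getD_eq_getElem _ _ (by omega)]
        congr 1
        omega
      have hd3 := isCnt_step d (sl.getD (i - pl.length) ' ') (sl.getD i ' ')
        ((sl.drop (i - pl.length + 1)).take (pl.length - 1)) (by rw [← hw1]; exact hd)
      rw [← hw2] at hd3
      have hstep : cpStep sl (pl.length : Int) (PySem.Dict.counter pl) (d, false) (i : Int)
          = ((if (d.modify (sl.getD (i - pl.length) ' ') 0 (· - 1)).getD (sl.getD (i - pl.length) ' ') 0 == 0
              then (d.modify (sl.getD (i - pl.length) ' ') 0 (· - 1)).erase (sl.getD (i - pl.length) ' ')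
              else d.modify (sl.getD (i - pl.length) ' ') 0 (· - 1)).insert (sl.getD i ' ')
              ((if (d.modify (sl.getD (i - pl.length) ' ') 0 (· - 1)).getD (sl.getD (i - pl.length) ' ') 0 == 0
                then (d.modify (sl.getD (i - pl.length) ' ') 0 (· - 1)).erase (sl.getD (i - pl.length) ' ')
                else d.modify (sl.getD (i - pl.length) ' ') 0 (· - 1)).getD (sl.getD i ' ') 0 + 1),
             pyDictEq ((if (d.modify (sl.getD (i - pl.length) ' ') 0 (· - 1)).getD (sl.getD (i - pl.length) ' ') 0 == 0
              then (d.modify (sl.getD (i - pl.length) ' ') 0 (· - 1)).erase (sl.getD (i - pl.length) ' ')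
              else d.modify (sl.getD (i - pl.length) ' ') 0 (· - 1)).insert (sl.getD i ' ')
              ((if (d.modify (sl.getD (i - pl.length) ' ') 0 (· - 1)).getD (sl.getD (i - pl.length) ' ') 0 == 0
                then (d.modify (sl.getD (i - pl.length) ' ') 0 (· - 1)).erase (sl.getD (i - pl.length) ' ')
                else d.modify (sl.getD (i - pl.length) ' ') 0 (· - 1)).getD (sl.getD i ' ') 0 + 1))
              (PySem.Dict.counter pl)) := by
        simp only [cpStep, hx, hy, Bool.false_eq_true, if_false]
      rw [hstep]
      set d3 := (if (d.modify (sl.getD (i - pl.length) ' ') 0 (· - 1)).getD (sl.getD (i - pl.length) ' ') 0 == 0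
              then (d.modify (sl.getD (i - pl.length) ' ') 0 (· - 1)).erase (sl.getD (i - pl.length) ' ')
              else d.modify (sl.getD (i - pl.length) ' ') 0 (· - 1)).insert (sl.getD i ' ')
              ((if (d.modify (sl.getD (i - pl.length) ' ') 0 (· - 1)).getD (sl.getD (i - pl.length) ' ') 0 == 0
                then (d.modify (sl.getD (i - pl.length) ' ') 0 (· - 1)).erase (sl.getD (i - pl.length) ' ')
                else d.modify (sl.getD (i - pl.length) ' ') 0 (· - 1)).getD (sl.getD i ' ') 0 + 1) with hd3def
      have hperm := pyDictEq_isCnt_iff d3 (PySem.Dict.counter pl)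
        ((sl.drop (i - pl.length + 1)).take pl.length) pl hd3 (isCnt_counter pl)
      by_cases hflag : pyDictEq d3 (PySem.Dict.counter pl) = true
      · rw [hflag, foldl_frozen]
        simp only [true_iff]
        exact ⟨i - pl.length + 1, by omega, by omega, hperm.mp hflag⟩
      · rw [Bool.not_eq_true] at hflag
        rw [hflag]
        rw [show i - pl.length + 1 = i + 1 - pl.length by omega] at hd3
        rw [show ((i : Int) + 1) = (((i + 1 : Nat)) : Int) by push_cast; ring]
        rw [ih (i + 1) (by omega) (by omega) (by omega) d3 hd3]
        constructor
        · rintro ⟨j, hj1, hj2, hj3⟩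
          exact ⟨j, by omega, hj2, hj3⟩
        · rintro ⟨j, hj1, hj2, hj3⟩
          by_cases hje : j = i - pl.length + 1
          · exfalso
            rw [show i - pl.length + 1 = i + 1 - pl.length by omega] at hje
            subst hje
            rw [show i + 1 - pl.length = i - pl.length + 1 by omega] at hj3
            rw [← hperm] at hj3
            rw [hj3] at hflag
            simp at hflag
          · exact ⟨j, by omega, hj2, hj3⟩


theorem contains_permutation_iff (input_string pattern : String)
    (h : ¬ input_string.toList.length < pattern.toList.length) :
    (contains_permutation input_string pattern = true ↔
      ∃ j, j ≤ input_string.toList.length - pattern.toList.length ∧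
        ((input_string.toList.drop j).take pattern.toList.length).Perm pattern.toList) := by
  simp only [contains_permutation, if_neg h, PySem.List.slice_to input_string.toList
      (by positivity : (0:Int) ≤ (pattern.toList.length : Int)), Int.toNat_natCast,
    PySem.Dict.foldl_insert_getD_add_one_eq_counter]
  set sl := input_string.toList
  set pl := pattern.toList
  by_cases h0 : pyDictEq (PySem.Dict.counter (sl.take pl.length)) (PySem.Dict.counter pl) = true
  · rw [if_pos h0]
    simp only [true_iff]
    refine ⟨0, by omega, ?_⟩
    rw [List.drop_zero]
    exact (pyDictEq_isCnt_iff _ _ (sl.take pl.length) pl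
      (isCnt_counter _) (isCnt_counter pl)).mp h0
  · rw [if_neg h0]
    have hperm0 : ¬ (sl.take pl.length).Perm pl :=
      fun hp => h0 ((pyDictEq_isCnt_iff _ _ (sl.take pl.length) pl
        (isCnt_counter _) (isCnt_counter pl)).mpr hp)
    have hk : 0 < pl.length := by
      rcases Nat.eq_zero_or_pos pl.length with hz | hp
    
      · exfalso
        have hpl : pl = [] := List.eq_nil_of_length_eq_zero hz
        apply hperm0
        rw [hpl]
        simp
      · exact hp
    have hd0 : IsCnt (PySem.Dict.counter (sl.take pl.length))
        ((sl.drop (pl.length - pl.length)).take pl.length) := by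
      rw [Nat.sub_self, List.drop_zero]
      exact isCnt_counter _
    rw [loop_lemma sl pl (by omega) hk (sl.length - pl.length) pl.length (by omega)
      (le_refl _) (by omega) (PySem.Dict.counter (sl.take pl.length)) hd0]
    constructor
    · rintro ⟨j, _, hj2, hj3⟩
      exact ⟨j, hj2, hj3⟩
    · rintro ⟨j, hj2, hj3⟩
      rcases Nat.eq_zero_or_pos j with rfl | hjp
      · exfalso
        rw [List.drop_zero] at hj3
        exact hperm0 hj3
      · exact ⟨j, by omega, hj2, hj3⟩


theorem contains_permutation_alt_iff (input_string pattern : String)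
    (h : ¬ input_string.toList.length < pattern.toList.length) :
    (contains_permutation_alt input_string pattern = true ↔
      ∃ j, j ≤ input_string.toList.length - pattern.toList.length ∧
        ((input_string.toList.drop j).take pattern.toList.length).Perm pattern.toList) := by
  simp only [contains_permutation_alt, if_neg h]
  set sl := input_string.toList
  set pl := pattern.toList
  have hpred : ∀ m : Nat,
      ((PySem.List.sorted (PySem.List.slice sl (some (m : Int))
          (some ((m : Int) + (pl.length : Int)))) (fun c => c) false
        == PySem.List.sorted pl (fun c => c) false) = true)
      ↔ ((sl.drop m).take pl.length).Perm pl := by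
    intro m
    rw [show ((m : Int) + (pl.length : Int)) = ((m + pl.length : Nat) : Int) by push_cast; ring,
      PySem.List.slice_natCast, show m + pl.length - m = pl.length by omega,
      beq_iff_eq, PySem.List.sorted_id_eq_sorted_id_iff_perm]
  rw [PySem.List.pyRange_zero_natCast (sl.length - pl.length + 1)]
  rw [List.any_map, List.any_eq_true]
  constructor
  · rintro ⟨m, hm, hpm⟩
    rw [List.mem_range] at hm
    exact ⟨m, by omega, (hpred m).mp hpm⟩
  · rintro ⟨j, hj, hperm⟩
    exact ⟨j, List.mem_range.mpr (by omega), (hpred j).mpr hperm⟩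


-- ===== VERDICT (by name: the statement is the Claim_ definition above) =====
theorem contains_permutation_spec : Claim_equal_contains_permutation := by
  intro s p _
  unfold Spec_contains_permutation
  by_cases h : s.toList.length < p.toList.length
  · simp only [contains_permutation, contains_permutation_alt, if_pos h]
  · rw [Bool.eq_iff_iff, contains_permutation_iff s p h, contains_permutation_alt_iff s p h]
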